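-- pv_equiv track=rewrite | github.com/jisu1013/algorithm_DFS-BFS | 2020KAKAO_bracket_answer.py | balanced_index
-- ===== SOURCE A (Python) =====
-- def balanced_index(p):
--     count=0
--     for i in range(len(p)):
--         if p[i] == '(':
--             count += 1
--         else:
--             count -= 1
--         if i == (len(p)-1):
--             return i
--         if count == 0:
--             return i
-- ===== SOURCE B (Python) =====
-- def balanced_index(p):
--     if not p:
--         return None
--     bal = []
--     s = 0
--     for c in p:
--         s += 1 if c == '(' else -1
--         bal.append(s)
--     for i, b in enumerate(bal):
--         if b == 0:
--             return i
--     return len(p) - 1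
-- ===== Notes on version B (the rewrite author's own statement) =====
-- stated objective: alternative
-- what changed: Replaced A's single loop with three early-return tests per step by two separate passes: first build the whole prefix-balance table, then scan it for the first zero index, falling back to len(p)-1.
-- outside the precondition, e.g. on balanced_index(''): A returns None, B returns None
import Mathlib
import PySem

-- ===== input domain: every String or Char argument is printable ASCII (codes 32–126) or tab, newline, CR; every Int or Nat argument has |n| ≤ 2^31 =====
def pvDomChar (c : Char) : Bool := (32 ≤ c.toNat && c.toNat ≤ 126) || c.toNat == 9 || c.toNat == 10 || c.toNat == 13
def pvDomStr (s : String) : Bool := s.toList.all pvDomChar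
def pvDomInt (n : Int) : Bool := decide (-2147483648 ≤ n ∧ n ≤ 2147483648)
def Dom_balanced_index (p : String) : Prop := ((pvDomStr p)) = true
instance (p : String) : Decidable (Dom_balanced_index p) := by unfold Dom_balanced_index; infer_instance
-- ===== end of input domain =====

-- B replaces A's single loop with early returns by two passes (build the prefix-balance
-- table, then scan it for the first zero); same cost, different decomposition.

-- ===== PORT A =====
-- A's loop over range(len(p)) with running count and two early-return tests.
def balancedA_go (cs : List Char) (i : Nat) (total : Nat) (count : Int) : Int :=
  match cs with
  | [] => 0  -- unreachable for nonempty p (Python A returns None on empty p, excluded by Pre_)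
  | c :: rest =>
    let count' := if c = '(' then count + 1 else count - 1
    if i = total - 1 then (i : Int)
    else if count' = 0 then (i : Int)
    else balancedA_go rest (i + 1) total count'

def balanced_index (p : String) : Int :=
  balancedA_go p.toList 0 p.toList.length 0

-- ===== PORT B =====
-- pass 1: the prefix-balance table
def balTable (cs : List Char) (s : Int) : List Int :=
  match cs with
  | [] => []
  | c :: rest =>
    let s' := s + (if c = '(' then 1 else -1)
    s' :: balTable rest s'

-- pass 2: first index whose balance is 0, else the default len(p)-1
def scanZero (bs : List Int) (i : Nat) (dflt : Int) : Int :=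
  match bs with
  | [] => dflt
  | b :: rest => if b = 0 then (i : Int) else scanZero rest (i + 1) dflt

def balanced_index_alt (p : String) : Int :=
  if p.toList.isEmpty then 0  -- Python B returns None here; outside Pre_, value unclaimed
  else scanZero (balTable p.toList 0) 0 ((p.toList.length - 1 : Nat) : Int)

-- ===== PRECONDITION & SPEC =====
-- Pre_ excludes only the empty string, on which Python A (and B) return None, not an int.
def Pre_balanced_index (p : String) : Prop := p ≠ ""
instance (p : String) : Decidable (Pre_balanced_index p) := by unfold Pre_balanced_index; infer_instance
def pvWitness_balanced_index : String := "(()"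

def Spec_balanced_index (p : String) (out : Int) : Prop := out = balanced_index_alt p
instance (p : String) (out : Int) : Decidable (Spec_balanced_index p out) := by unfold Spec_balanced_index; infer_instance

-- ===== CLAIM (what is proved, stated in full; the proofs are below) =====
def Claim_equal_balanced_index : Prop := ∀ (p : String), Dom_balanced_index p → Pre_balanced_index p → Spec_balanced_index p (balanced_index p)

-- ===== LEMMAS AND PROOFS =====

theorem step_eq (c : Char) (count : Int) :
    (if c = '(' then count + 1 else count - 1) = count + (if c = '(' then 1 else -1) := by
  split_ifs <;> ring

theorem goA_cons (c : Char) (rest : List Char) (i total : Nat) (count : Int) :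
    balancedA_go (c :: rest) i total count =
      (if i = total - 1 then (i : Int)
       else if count + (if c = '(' then 1 else -1) = 0 then (i : Int)
       else balancedA_go rest (i + 1) total (count + (if c = '(' then 1 else -1))) := by
  simp only [balancedA_go, step_eq]

theorem balTable_cons (c : Char) (rest : List Char) (s : Int) :
    balTable (c :: rest) s
      = (s + (if c = '(' then 1 else -1)) :: balTable rest (s + (if c = '(' then 1 else -1)) := rfl

theorem scanZero_cons (b : Int) (rest : List Int) (i : Nat) (d : Int) :
    scanZero (b :: rest) i d = if b = 0 then (i : Int) else scanZero rest (i + 1) d := rfl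

theorem go_eq_scan (cs : List Char) (count : Int) (i : Nat) (h : cs ≠ []) :
    balancedA_go cs i (i + cs.length) count
      = scanZero (balTable cs count) i ((i + cs.length - 1 : Nat) : Int) := by
  induction cs generalizing count i with
  | nil => exact absurd rfl h
  | cons c rest ih =>
    rw [goA_cons, balTable_cons, scanZero_cons]
    cases rest with
    | nil =>
      rw [if_pos (by simp)]
      by_cases hz : count + (if c = '(' then 1 else -1) = 0 <;> simp [hz, balTable, scanZero]
    | cons d rest' =>
      rw [if_neg (by simp only [List.length_cons]; omega)]
      by_cases hz : count + (if c = '(' then 1 else -1) = 0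
      · simp [hz]
      · rw [if_neg hz, if_neg hz]
        have hrec := ih (count + (if c = '(' then 1 else -1)) (i + 1) (by simp)
        have e1 : (i + 1) + (d :: rest').length = i + (c :: d :: rest').length := by
          simp only [List.length_cons]; omega
        rw [e1] at hrec
        exact hrec

-- ===== VERDICT (by name: the statement is the Claim_ definition above) =====
theorem balanced_index_spec : Claim_equal_balanced_index := by
  intro p _ hpre
  have hne : p.toList ≠ [] := by
    intro h
    exact hpre (by simpa using congrArg String.ofList h)
  unfold Spec_balanced_index balanced_index balanced_index_alt
  rw [if_neg (by simpa [List.isEmpty_iff] using hne)]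
  have hmain := go_eq_scan p.toList 0 0 hne
  simpa using hmain
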